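-- pv_equiv track=rewrite | github.com/iafiscal1212/Selector-Complexity-Framework | discovery/landscape.py | _gf2_is_unsat
-- ===== SOURCE A (Python) =====
-- def _gf2_is_unsat(clauses_vars, b_vec, n):
--     """Check if the XOR system is unsatisfiable via GF(2) Gauss."""
--     m = len(clauses_vars)
--     # Augmented matrix as bitmasks: bits 0..n-1 = coefficients, bit n = RHS
--     aug = []
--     for vars_chosen, bi in zip(clauses_vars, b_vec):
--         row = 0
--         for v in vars_chosen:
--             row |= (1 << v)
--         if bi:
--             row |= (1 << n)
--         aug.append(row)
--
--     rank = 0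
--     for col in range(n):
--         pivot = None
--         for r in range(rank, m):
--             if aug[r] & (1 << col):
--                 pivot = r
--                 break
--         if pivot is None:
--             continue
--         aug[rank], aug[pivot] = aug[pivot], aug[rank]
--         for r in range(m):
--             if r != rank and aug[r] & (1 << col):
--                 aug[r] ^= aug[rank]
--         rank += 1
--
--     # Inconsistent if any row has 0 coefficients but nonzero RHS
--     for r in range(rank, m):
--         if aug[r] & (1 << n):
--             return True
--     return False
-- ===== SOURCE B (Python) =====
-- def _gf2_is_unsat(clauses_vars, b_vec, n):
--     """Row-major GF(2) elimination: reduce each incoming augmented row against a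
--     pivot basis kept sorted by pivot bit (descending); a row that reduces to zero
--     coefficients with the RHS bit still set proves unsatisfiability immediately."""
--     if not clauses_vars or not b_vec:
--         return False
--     mask = (1 << n) - 1
--     basis = []  # list of (pivot, row), pivots strictly decreasing
--     for vars_chosen, bi in zip(clauses_vars, b_vec):
--         row = (1 << n) if bi else 0
--         for v in vars_chosen:
--             row |= 1 << v
--         for p, brow in basis:
--             if (row >> p) & 1:
--                 row ^= brow
--         coeff = row & mask
--         if coeff == 0:
--             if (row >> n) & 1:
--                 return True
--         else:
--             p = coeff.bit_length() - 1
--             i = 0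
--             while i < len(basis) and basis[i][0] > p:
--                 i += 1
--             basis.insert(i, (p, row))
--     return False
-- ===== Notes on version B (the rewrite author's own statement) =====
-- stated objective: alternative
-- what changed: Replaces the column-major in-place Gaussian sweep with row swaps by an incremental row-major reduction: each augmented row is reduced once against a pivot-sorted basis list, inconsistency is reported as soon as a row reduces to zero coefficients with the RHS bit set.
-- outside the precondition, e.g. on _gf2_is_unsat([[], []], [1], 0): A returns True, B returns True
import Mathlib
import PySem

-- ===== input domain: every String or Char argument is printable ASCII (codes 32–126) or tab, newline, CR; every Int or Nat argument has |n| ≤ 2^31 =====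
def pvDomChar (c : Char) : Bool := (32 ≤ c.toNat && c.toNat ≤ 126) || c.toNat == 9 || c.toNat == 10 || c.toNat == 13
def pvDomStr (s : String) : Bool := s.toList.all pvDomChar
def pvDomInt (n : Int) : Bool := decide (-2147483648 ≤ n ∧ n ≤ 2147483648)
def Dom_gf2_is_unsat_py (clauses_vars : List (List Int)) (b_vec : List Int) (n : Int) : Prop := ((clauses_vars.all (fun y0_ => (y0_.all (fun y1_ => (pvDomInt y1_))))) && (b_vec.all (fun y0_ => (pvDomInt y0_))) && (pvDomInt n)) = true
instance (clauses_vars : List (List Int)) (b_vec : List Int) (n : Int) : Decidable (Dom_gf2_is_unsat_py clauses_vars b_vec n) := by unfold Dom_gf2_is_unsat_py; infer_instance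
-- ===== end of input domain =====

-- B replaces A's column-major in-place Gaussian sweep by an incremental row-major
-- reduction against a pivot-sorted basis (alternative algorithm, similar cost).

-- ===== PORT A =====
-- row = 0; for v in vars: row |= 1 << v; if bi: row |= 1 << n
def pvRowA (c : List Int) (bi : Int) (n : Int) : Nat :=
  let r := c.foldl (fun row v => row ||| (1 <<< v.toNat)) 0
  if bi ≠ 0 then r ||| (1 <<< n.toNat) else r

def pvAugA (clauses_vars : List (List Int)) (b_vec : List Int) (n : Int) : List Nat :=
  (clauses_vars.zip b_vec).map (fun p => pvRowA p.1 p.2 n)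

-- one column of A's sweep: pivot search in rows rank..m-1, swap, clear column in all other rows
def pvStepA (m : Nat) (st : List Nat × Nat) (col : Nat) : List Nat × Nat :=
  match (List.range' st.2 (m - st.2)).find? (fun r => st.1.getD r 0 &&& (1 <<< col) != 0) with
  | none => st
  | some p =>
    let a1 := (st.1.set st.2 (st.1.getD p 0)).set p (st.1.getD st.2 0)
    let a2 := (List.range m).foldl
      (fun a r => if r ≠ st.2 ∧ a.getD r 0 &&& (1 <<< col) ≠ 0 then a.set r (a.getD r 0 ^^^ a.getD st.2 0) else a) a1
    (a2, st.2 + 1)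

-- for col in range(n): … (counter recursion instead of materialising range(n))
def pvColsA (m N col : Nat) (st : List Nat × Nat) : List Nat × Nat :=
  if col < N then pvColsA m N (col + 1) (pvStepA m st col) else st
termination_by N - col

def gf2_is_unsat_py (clauses_vars : List (List Int)) (b_vec : List Int) (n : Int) : Bool :=
  let m := clauses_vars.length
  let fin := pvColsA m n.toNat 0 (pvAugA clauses_vars b_vec n, 0)
  (List.range' fin.2 (m - fin.2)).any (fun r => fin.1.getD r 0 &&& (1 <<< n.toNat) != 0)

-- ===== PORT B =====
-- row = (1 << n) if bi else 0; for v in vars: row |= 1 << v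
def pvRowB (c : List Int) (bi : Int) (N : Nat) : Nat :=
  c.foldl (fun row v => row ||| (1 <<< v.toNat)) (if bi ≠ 0 then 1 <<< N else 0)

-- for p, brow in basis: if (row >> p) & 1: row ^= brow
def pvReduceB (basis : List (Nat × Nat)) (row : Nat) : Nat :=
  basis.foldl (fun r pb => if r.testBit pb.1 then r ^^^ pb.2 else r) row

-- insert before the first basis entry whose pivot is not greater than p
def pvInsertB (p : Nat) (row : Nat) : List (Nat × Nat) → List (Nat × Nat)
  | [] => [(p, row)]
  | (q, br) :: t => if p < q then (q, br) :: pvInsertB p row t else (p, row) :: (q, br) :: t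

def pvLoopB (N mask : Nat) (basis : List (Nat × Nat)) : List (List Int × Int) → Bool
  | [] => false
  | (c, bi) :: rest =>
    let row := pvReduceB basis (pvRowB c bi N)
    let coeff := row &&& mask
    if coeff = 0 then
      if row.testBit N then true else pvLoopB N mask basis rest
    else pvLoopB N mask (pvInsertB coeff.log2 row basis) rest

def gf2_is_unsat_py_alt (clauses_vars : List (List Int)) (b_vec : List Int) (n : Int) : Bool :=
  if clauses_vars.isEmpty || b_vec.isEmpty then false
  else pvLoopB n.toNat ((1 <<< n.toNat) - 1) [] (clauses_vars.zip b_vec)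

-- ===== PRECONDITION & SPEC =====
-- Pre_ excludes exactly the inputs where the Python A raises (a negative variable index or a
-- truthy RHS with negative n reaches a negative shift; more clauses than RHS entries makes a
-- sweep index run past the built row list), except that on a few mismatched-length inputs A
-- happens to return True before hitting the IndexError — B also returns True there (see cites).
def Pre_gf2_is_unsat_py (clauses_vars : List (List Int)) (b_vec : List Int) (n : Int) : Prop :=
  clauses_vars = [] ∨
    (clauses_vars.length ≤ b_vec.length ∧ 0 ≤ n ∧ ∀ c ∈ clauses_vars, ∀ v ∈ c, 0 ≤ v)
instance (clauses_vars : List (List Int)) (b_vec : List Int) (n : Int) : Decidable (Pre_gf2_is_unsat_py clauses_vars b_vec n) := by unfold Pre_gf2_is_unsat_py; infer_instance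

def pvWitness_gf2_is_unsat_py : List (List Int) × List Int × Int := ([[0], [0, 1]], [1, 0], 2)

def Spec_gf2_is_unsat_py (clauses_vars : List (List Int)) (b_vec : List Int) (n : Int) (out : Bool) : Prop := out = gf2_is_unsat_py_alt clauses_vars b_vec n
instance (clauses_vars : List (List Int)) (b_vec : List Int) (n : Int) (out : Bool) : Decidable (Spec_gf2_is_unsat_py clauses_vars b_vec n out) := by unfold Spec_gf2_is_unsat_py; infer_instance

-- ===== CLAIM (what is proved, stated in full; the proofs are below) =====
def Claim_equal_gf2_is_unsat_py : Prop := ∀ (clauses_vars : List (List Int)) (b_vec : List Int) (n : Int), Dom_gf2_is_unsat_py clauses_vars b_vec n → Pre_gf2_is_unsat_py clauses_vars b_vec n → Spec_gf2_is_unsat_py clauses_vars b_vec n (gf2_is_unsat_py clauses_vars b_vec n)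

-- ===== LEMMAS AND PROOFS =====

-- ---- generic bit lemmas ----
theorem pv_mask_testBit (x N k : Nat) :
    (x &&& (2 ^ N - 1)).testBit k = (x.testBit k && decide (k < N)) := by
  rw [Nat.testBit_and, Nat.testBit_two_pow_sub_one]

theorem pv_mask_zero_iff (x N : Nat) :
    x &&& (2 ^ N - 1) = 0 ↔ ∀ k, k < N → x.testBit k = false := by
  constructor
  · intro h k hk
    have := congrArg (fun y => y.testBit k) h
    simp [pv_mask_testBit, hk] at this
    exact this
  · intro h
    apply Nat.eq_of_testBit_eq
    intro i
    rw [pv_mask_testBit, Nat.zero_testBit]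
    by_cases hi : i < N
    · simp [h i hi]
    · simp [hi]

theorem pv_full_iff (x N : Nat) :
    x &&& (2 ^ (N + 1) - 1) = 0 ↔ (x &&& (2 ^ N - 1) = 0 ∧ x.testBit N = false) := by
  rw [pv_mask_zero_iff, pv_mask_zero_iff]
  constructor
  · intro h
    exact ⟨fun k hk => h k (by omega), h N (by omega)⟩
  · rintro ⟨h1, h2⟩ k hk
    rcases Nat.lt_or_ge k N with h | h
    · exact h1 k h
    · have : k = N := by omega
      subst this; exact h2

theorem pv_testBit_log2 (x : Nat) (hx : x ≠ 0) : x.testBit x.log2 = true := by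
  have h1 : 2 ^ x.log2 ≤ x := Nat.log2_self_le hx
  have h2 : x < 2 ^ (x.log2 + 1) := Nat.lt_log2_self
  have hd : x / 2 ^ x.log2 = 1 := by
    have hpos : 0 < 2 ^ x.log2 := Nat.pow_pos (by omega)
    have hle : 1 ≤ x / 2 ^ x.log2 := (Nat.one_le_div_iff hpos).mpr h1
    have hlt : x / 2 ^ x.log2 < 2 := by
      rw [Nat.div_lt_iff_lt_mul hpos]
      rw [pow_succ] at h2
      omega
    omega
  rw [Nat.testBit, Nat.shiftRight_eq_div_pow, hd]
  rfl

theorem pv_testBit_false_of_log2_lt {x k : Nat} (h : x = 0 ∨ x.log2 < k) : x.testBit k = false := by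
  rcases h with h | h
  · subst h; exact Nat.zero_testBit k
  · rcases Nat.eq_zero_or_pos x with h0 | h0
    · subst h0; exact Nat.zero_testBit k
    · exact Nat.testBit_lt_two_pow ((Nat.log2_lt (by omega)).mp h)

theorem pv_getD_set (l : List Nat) (i j : Nat) (a : Nat) :
    (l.set i a).getD j 0 = if i = j ∧ i < l.length then a else l.getD j 0 := by
  rw [List.getD_eq_getElem?_getD, List.getD_eq_getElem?_getD, List.getElem?_set]
  by_cases h : i = j
  · subst h
    by_cases h2 : i < l.length <;> simp [h2]
  · simp [h]

theorem pv_getD_eq_zero {l : List Nat} {i : Nat} (h : l.length ≤ i) : l.getD i 0 = 0 := by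
  rw [List.getD_eq_getElem?_getD, List.getElem?_eq_none (by omega)]
  rfl

-- ---- GF(2) span of a list of bitmask rows ----
inductive PvSpan (l : List Nat) : Nat → Prop
  | zero : PvSpan l 0
  | step (r x : Nat) : r ∈ l → PvSpan l x → PvSpan l (r ^^^ x)

theorem pvSpan_mem {l : List Nat} {r : Nat} (h : r ∈ l) : PvSpan l r := by
  have := PvSpan.step r 0 h PvSpan.zero
  simpa using this

theorem pvSpan_xor {l : List Nat} {x y : Nat} (hx : PvSpan l x) (hy : PvSpan l y) :
    PvSpan l (x ^^^ y) := by
  induction hx with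
  | zero => simpa using hy
  | step r z hr _ ih =>
    rw [Nat.xor_assoc]
    exact PvSpan.step r _ hr ih

theorem pvSpan_mono {l l' : List Nat} (h : ∀ r ∈ l, r ∈ l') {x : Nat} (hx : PvSpan l x) :
    PvSpan l' x := by
  induction hx with
  | zero => exact PvSpan.zero
  | step r z hr _ ih => exact PvSpan.step r z (h r hr) ih

theorem pvSpan_trans {l l' : List Nat} (h : ∀ r ∈ l, PvSpan l' r) {x : Nat} (hx : PvSpan l x) :
    PvSpan l' x := by
  induction hx with
  | zero => exact PvSpan.zero
  | step r z hr _ ih => exact pvSpan_xor (h r hr) ih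

theorem pvSpan_nil {x : Nat} (h : PvSpan [] x) : x = 0 := by
  induction h with
  | zero => rfl
  | step r z hr _ _ => simp at hr

-- ---- selection normal form ----
def pvSel : List Bool → List Nat → Nat
  | b :: bs, r :: rs => (if b then r else 0) ^^^ pvSel bs rs
  | _, _ => 0

theorem pvSel_bit_false {l : List Nat} {k : Nat} (h : ∀ r ∈ l, r.testBit k = false) :
    ∀ s, (pvSel s l).testBit k = false := by
  induction l with
  | nil => intro s; cases s <;> simp [pvSel, Nat.zero_testBit]
  | cons a t ih =>
    intro s
    cases s with
    | nil => simp [pvSel, Nat.zero_testBit]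
    | cons b bs =>
      have ha : a.testBit k = false := h a (by simp)
      have ht := ih (fun r hr => h r (by simp [hr])) bs
      cases b <;> simp [pvSel, Nat.testBit_xor, ha, ht, Nat.zero_testBit]

theorem pvSel_flip {l : List Nat} {r : Nat} (hr : r ∈ l) :
    ∀ s, s.length = l.length → ∃ s', s'.length = l.length ∧ pvSel s' l = r ^^^ pvSel s l := by
  induction l with
  | nil => simp at hr
  | cons a t ih =>
    intro s hs
    cases s with
    | nil => simp at hs
    | cons b bs =>
      simp at hs
      rcases List.mem_cons.mp hr with h | h
      · subst h
        refine ⟨(!b) :: bs, by simp [hs], ?_⟩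
        cases b
        · simp [pvSel]
        · show pvSel (false :: bs) (r :: t) = r ^^^ pvSel (true :: bs) (r :: t)
          show (0 : Nat) ^^^ pvSel bs t = r ^^^ ((if True then r else 0) ^^^ pvSel bs t)
          rw [if_pos trivial, Nat.zero_xor, ← Nat.xor_assoc, Nat.xor_self, Nat.zero_xor]
      · rcases ih h bs hs with ⟨s', hs', he⟩
        refine ⟨b :: s', by simp [hs'], ?_⟩
        cases b <;> simp [pvSel, he]
        · rw [← Nat.xor_assoc, Nat.xor_comm a r, Nat.xor_assoc]

theorem pvSpan_to_sel {l : List Nat} {x : Nat} (h : PvSpan l x) :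
    ∃ s, s.length = l.length ∧ x = pvSel s l := by
  induction h with
  | zero =>
    refine ⟨List.replicate l.length false, by simp, ?_⟩
    induction l with
    | nil => simp [pvSel]
    | cons a t ih => simpa [pvSel, List.replicate_succ] using ih
  | step r z hr _ ih =>
    rcases ih with ⟨s, hs, he⟩
    rcases pvSel_flip hr s hs with ⟨s', hs', he'⟩
    exact ⟨s', hs', by rw [he', he]⟩

-- ---- consistency structure: pivot rows then null rows ----
inductive PvCons (N : Nat) : List Nat → Prop
  | nil : PvCons N []
  | null (x : Nat) (l : List Nat) : x &&& (2 ^ (N + 1) - 1) = 0 → PvCons N l → PvCons N (x :: l)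
  | piv (x : Nat) (l : List Nat) (p : Nat) : p < N → x.testBit p = true →
      (∀ y ∈ l, y.testBit p = false) → PvCons N l → PvCons N (x :: l)

theorem pvCons_sel {N : Nat} {l : List Nat} (h : PvCons N l) :
    ∀ s, (pvSel s l) &&& (2 ^ N - 1) = 0 → (pvSel s l).testBit N = false := by
  induction h with
  | nil => intro s _; cases s <;> simp [pvSel, Nat.zero_testBit]
  | null x t hx _ ih =>
    intro s hm
    cases s with
    | nil => simp [pvSel, Nat.zero_testBit]
    | cons b bs =>
      have e : pvSel (b :: bs) (x :: t) = (if b then x else 0) ^^^ pvSel bs t := rfl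
      have hx' := (pv_full_iff x N).mp hx
      have hxm : ∀ k, k < N → x.testBit k = false := (pv_mask_zero_iff x N).mp hx'.1
      have hxif : ∀ k, k < N → (if b then x else 0).testBit k = false := by
        intro k hk; cases b <;> simp [hxm k hk, Nat.zero_testBit]
      have hm' : pvSel bs t &&& (2 ^ N - 1) = 0 := by
        rw [pv_mask_zero_iff] at hm ⊢
        intro k hk
        have h2 := hm k hk
        rw [e, Nat.testBit_xor, hxif k hk] at h2
        simpa using h2
      have hifN : (if b then x else 0).testBit N = false := by
        cases b <;> simp [hx'.2, Nat.zero_testBit]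
      rw [e, Nat.testBit_xor, hifN, ih bs hm']
      rfl
  | piv x t p hp hxp htp _ ih =>
    intro s hm
    cases s with
    | nil => simp [pvSel, Nat.zero_testBit]
    | cons b bs =>
      have e : pvSel (b :: bs) (x :: t) = (if b then x else 0) ^^^ pvSel bs t := rfl
      cases b with
      | false =>
        have hm2 : pvSel bs t &&& (2 ^ N - 1) = 0 := by
          rw [e] at hm; simpa using hm
        rw [e]; simpa using ih bs hm2
      | true =>
        exfalso
        have h1 : (pvSel (true :: bs) (x :: t)).testBit p = true := by
          rw [e, Nat.testBit_xor]
          simp [hxp, pvSel_bit_false htp bs]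
        have h0 := (pv_mask_zero_iff _ N).mp hm p hp
        rw [h0] at h1
        exact Bool.false_ne_true h1

theorem pvCons_consis {N : Nat} {l : List Nat} (hc : PvCons N l) {x : Nat}
    (hx : PvSpan l x) (hm : x &&& (2 ^ N - 1) = 0) : x.testBit N = false := by
  rcases pvSpan_to_sel hx with ⟨s, _, he⟩
  subst he
  exact pvCons_sel hc s hm

-- index-based construction of PvCons
theorem pvCons_of_idx {N : Nat} :
    ∀ l : List Nat,
      (∀ i, i < l.length →
        (l.getD i 0 &&& (2 ^ (N + 1) - 1) = 0) ∨
        ∃ p, p < N ∧ (l.getD i 0).testBit p = true ∧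
          ∀ j, j ≠ i → (l.getD j 0).testBit p = false) →
      PvCons N l := by
  intro l
  induction l with
  | nil => intro _; exact PvCons.nil
  | cons a t ih =>
    intro h
    have h0 := h 0 (by simp)
    rcases h0 with h0 | ⟨p, hp, ha, hall⟩
    · exact PvCons.null a t (by simpa using h0) (ih (fun i hi => by
        have := h (i + 1) (by simpa using Nat.succ_lt_succ hi)
        rcases this with h1 | ⟨p, hp, hb, hall⟩
        · left; simpa using h1
        · right
          exact ⟨p, hp, by simpa using hb, fun j hj => by
            have := hall (j + 1) (by omega)
            simpa using this⟩))
    · refine PvCons.piv a t p hp (by simpa using ha) ?_ (ih (fun i hi => by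
        have := h (i + 1) (by simpa using Nat.succ_lt_succ hi)
        rcases this with h1 | ⟨q, hq, hb, hall'⟩
        · left; simpa using h1
        · right
          exact ⟨q, hq, by simpa using hb, fun j hj => by
            have := hall' (j + 1) (by omega)
            simpa using this⟩))
      intro y hy
      rcases List.mem_iff_getElem.mp hy with ⟨j, hj, he⟩
      have := hall (j + 1) (by omega)
      rw [List.getD_eq_getElem?_getD] at this
      simp [List.getElem?_cons_succ, List.getElem?_eq_getElem hj, he] at this
      exact this

-- ================= A-side invariant =================

def PvInvA (rows : List Nat) (N col : Nat) (aug : List Nat) (rank : Nat) : Prop :=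
  aug.length = rows.length ∧ rank ≤ aug.length ∧
  (∀ r ∈ aug, PvSpan rows r) ∧ (∀ r ∈ rows, PvSpan aug r) ∧
  (∀ r, rank ≤ r → aug.getD r 0 &&& (2 ^ col - 1) = 0) ∧
  ∃ cs : List Nat, cs.length = rank ∧ ∀ i, i < rank →
    cs.getD i 0 < col ∧ (aug.getD i 0).testBit (cs.getD i 0) = true ∧
    ∀ j, j ≠ i → (aug.getD j 0).testBit (cs.getD i 0) = false

theorem pv_and_pow_ne' (x k : Nat) : (x &&& (1 <<< k) ≠ 0) ↔ x.testBit k = true := by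
  rw [Nat.shiftLeft_eq, one_mul, Nat.and_two_pow]
  cases h : x.testBit k <;> simp

theorem pv_lt_len_of_testBit {l : List Nat} {j k : Nat} (h : (l.getD j 0).testBit k = true) :
    j < l.length := by
  by_contra hc
  rw [pv_getD_eq_zero (by omega), Nat.zero_testBit] at h
  cases h

theorem pv_getD_mem {l : List Nat} {j : Nat} (h : j < l.length) : l.getD j 0 ∈ l := by
  rw [List.getD_eq_getElem?_getD, List.getElem?_eq_getElem h]
  exact List.getElem_mem h

theorem pv_xor_clear {x y M : Nat} (hx : x &&& M = 0) (hy : y &&& M = 0) :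
    (x ^^^ y) &&& M = 0 := by
  rw [Nat.and_xor_distrib_right, hx, hy]
  rfl

theorem pv_swap_getD {A : List Nat} {rank p : Nat} (hrank : rank < A.length)
    (hp : p < A.length) (j : Nat) :
    ((A.set rank (A.getD p 0)).set p (A.getD rank 0)).getD j 0 =
      if p = j then A.getD rank 0 else if rank = j then A.getD p 0 else A.getD j 0 := by
  rw [pv_getD_set, pv_getD_set]
  by_cases h1 : p = j
  · rw [if_pos ⟨h1, by rw [List.length_set]; exact hp⟩, if_pos h1]
  · rw [if_neg (by tauto), if_neg h1]
    by_cases h2 : rank = j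
    · rw [if_pos ⟨h2, hrank⟩, if_pos h2]
    · rw [if_neg (by tauto), if_neg h2]

def pvPassF (rank col : Nat) (a : List Nat) (r : Nat) : List Nat :=
  if r ≠ rank ∧ a.getD r 0 &&& (1 <<< col) ≠ 0 then a.set r (a.getD r 0 ^^^ a.getD rank 0) else a

theorem pvPass_spec (a1 : List Nat) (rank col : Nat) :
    ∀ k, ((List.range k).foldl (pvPassF rank col) a1).length = a1.length ∧
      (∀ j, k ≤ j → ((List.range k).foldl (pvPassF rank col) a1).getD j 0 = a1.getD j 0) ∧
      (∀ j, j < k → ((List.range k).foldl (pvPassF rank col) a1).getD j 0 =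
        if j ≠ rank ∧ (a1.getD j 0).testBit col = true
          then a1.getD j 0 ^^^ a1.getD rank 0 else a1.getD j 0) := by
  intro k
  induction k with
  | zero => exact ⟨rfl, fun j _ => rfl, fun j hj => absurd hj (by omega)⟩
  | succ k ih =>
    obtain ⟨ihlen, ihhi, ihlo⟩ := ih
    rw [List.range_succ, List.foldl_append, List.foldl_cons, List.foldl_nil]
    set ak := (List.range k).foldl (pvPassF rank col) a1 with hak
    have hakk : ak.getD k 0 = a1.getD k 0 := ihhi k le_rfl
    have hrank_eq : ak.getD rank 0 = a1.getD rank 0 := by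
      by_cases h : k ≤ rank
      · exact ihhi rank h
      · rw [ihlo rank (by omega)]
        simp
    show (pvPassF rank col ak k).length = a1.length ∧ _ ∧ _
    by_cases hcond : k ≠ rank ∧ ak.getD k 0 &&& (1 <<< col) ≠ 0
    · have hbit : (a1.getD k 0).testBit col = true := by
        rw [← hakk]; exact (pv_and_pow_ne' _ _).mp hcond.2
      have hkL : k < ak.length := pv_lt_len_of_testBit (by rw [hakk]; exact hbit)
      rw [pvPassF, if_pos hcond]
      refine ⟨by rw [List.length_set, ihlen], ?_, ?_⟩
      · intro j hj
        rw [pv_getD_set, if_neg (by omega), ihhi j (by omega)]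
      · intro j hj
        rw [pv_getD_set]
        by_cases hjk : k = j
        · subst hjk
          rw [if_pos ⟨rfl, hkL⟩, if_pos ⟨hcond.1, hbit⟩, hakk, hrank_eq]
        · rw [if_neg (by tauto), ihlo j (by omega)]
    · rw [pvPassF, if_neg hcond]
      refine ⟨ihlen, fun j hj => ihhi j (by omega), ?_⟩
      intro j hj
      by_cases hjk : j = k
      · subst hjk
        rw [ihhi j le_rfl]
        have : ¬ (j ≠ rank ∧ (a1.getD j 0).testBit col = true) := by
          intro hc
          exact hcond ⟨hc.1, by rw [hakk]; exact (pv_and_pow_ne' _ _).mpr hc.2⟩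
        rw [if_neg this]
      · exact ihlo j (by omega)

theorem pvStepA_inv {rows : List Nat} {N col m : Nat} {st : List Nat × Nat}
    (hm : rows.length ≤ m) (h : PvInvA rows N col st.1 st.2) :
    PvInvA rows N (col + 1) (pvStepA m st col).1 (pvStepA m st col).2 := by
  obtain ⟨A, rank⟩ := st
  obtain ⟨hlen, hrank, hspanF, hspanB, hclear, cs, hcslen, hcs⟩ := h
  dsimp only at hlen hrank hspanF hspanB hclear hcslen hcs
  cases hfind : (List.range' rank (m - rank)).find? (fun r => A.getD r 0 &&& (1 <<< col) != 0) with
  | none =>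
    have hstep : pvStepA m (A, rank) col = (A, rank) := by
      unfold pvStepA
      rw [hfind]
    rw [hstep]
    dsimp only
    have hnone := List.find?_eq_none.mp hfind
    refine ⟨hlen, hrank, hspanF, hspanB, ?_, cs, hcslen, ?_⟩
    · intro r hr
      rw [pv_full_iff]
      refine ⟨hclear r hr, ?_⟩
      by_cases hrL : r < A.length
      · have hrm : r ∈ List.range' rank (m - rank) := by
          rw [List.mem_range'_1]
          omega
        have h0 := hnone r hrm
        simp only [bne_iff_ne, ne_eq, Decidable.not_not] at h0
        cases htb : (A.getD r 0).testBit col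
        · rfl
        · exact absurd h0 ((pv_and_pow_ne' _ _).mpr htb)
      · rw [pv_getD_eq_zero (by omega), Nat.zero_testBit]
    · intro i hi
      obtain ⟨h1, h2, h3⟩ := hcs i hi
      exact ⟨by omega, h2, h3⟩
  | some p =>
    have hmem := List.mem_range'_1.mp (List.mem_of_find?_eq_some hfind)
    have hpred := List.find?_some hfind
    simp only [bne_iff_ne, ne_eq] at hpred
    have hpbit : (A.getD p 0).testBit col = true := (pv_and_pow_ne' _ _).mp hpred
    have hpL : p < A.length := pv_lt_len_of_testBit hpbit
    have hrkL : rank < A.length := by omega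
    set a1 := (A.set rank (A.getD p 0)).set p (A.getD rank 0) with ha1
    have ha1len : a1.length = A.length := by rw [ha1, List.length_set, List.length_set]
    have ha1get : ∀ j, a1.getD j 0 =
        if p = j then A.getD rank 0 else if rank = j then A.getD p 0 else A.getD j 0 :=
      fun j => pv_swap_getD hrkL hpL j
    set a2 := (List.range m).foldl (pvPassF rank col) a1 with ha2
    have hstep : pvStepA m (A, rank) col = (a2, rank + 1) := by
      unfold pvStepA
      rw [hfind]
      rfl
    rw [hstep]
    dsimp only
    obtain ⟨hplen, hphi, hplo⟩ := pvPass_spec a1 rank col m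
    have ha2len : a2.length = A.length := by rw [← ha1len]; exact hplen
    have ha2get : ∀ j, a2.getD j 0 =
        if j ≠ rank ∧ (a1.getD j 0).testBit col = true
          then a1.getD j 0 ^^^ a1.getD rank 0 else a1.getD j 0 := by
      intro j
      by_cases hj : j < m
      · exact hplo j hj
      · rw [hphi j (by omega)]
        have : a1.getD j 0 = 0 := pv_getD_eq_zero (by omega)
        rw [if_neg (by rw [this, Nat.zero_testBit]; tauto)]
    have ha1rank : a1.getD rank 0 = A.getD p 0 := by
      rw [ha1get]
      by_cases hpr : p = rank
      · rw [if_pos hpr, hpr]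
      · rw [if_neg hpr, if_pos rfl]
    have ha2rank : a2.getD rank 0 = A.getD p 0 := by
      rw [ha2get, if_neg (by tauto), ha1rank]
    -- every entry of a1 is an entry of A read at a permuted index
    have ha1span : ∀ j, PvSpan rows (a1.getD j 0) := by
      intro j
      rw [ha1get]
      by_cases h1 : p = j
      · rw [if_pos h1]; exact hspanF _ (pv_getD_mem hrkL)
      · rw [if_neg h1]
        by_cases h2 : rank = j
        · rw [if_pos h2]; exact hspanF _ (pv_getD_mem hpL)
        · rw [if_neg h2]
          by_cases h3 : j < A.length
          · exact hspanF _ (pv_getD_mem h3)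
          · rw [pv_getD_eq_zero (by omega)]; exact PvSpan.zero
    -- tail rows of a1 (index ≥ rank) still have bits < col clear
    have ha1clear : ∀ r, rank ≤ r → a1.getD r 0 &&& (2 ^ col - 1) = 0 := by
      intro r hr
      rw [ha1get]
      by_cases h1 : p = r
      · rw [if_pos h1]; exact hclear rank le_rfl
      · rw [if_neg h1]
        by_cases h2 : rank = r
        · rw [if_pos h2]; exact hclear p (by omega)
        · rw [if_neg h2]; exact hclear r hr
    -- a2 column col is clear everywhere except at rank
    have ha2col : ∀ j, j ≠ rank → (a2.getD j 0).testBit col = false := by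
      intro j hj
      rw [ha2get]
      by_cases hb : (a1.getD j 0).testBit col = true
      · rw [if_pos ⟨hj, hb⟩, Nat.testBit_xor, hb, ha1rank, hpbit]
        rfl
      · rw [if_neg (by tauto)]
        simpa using hb
    refine ⟨by rw [ha2len, hlen], by omega, ?_, ?_, ?_, cs ++ [col], by simp [hcslen], ?_⟩
    · -- forward span
      intro r hr
      rcases List.mem_iff_getElem.mp hr with ⟨j, hjL, he⟩
      have : r = a2.getD j 0 := by
        rw [List.getD_eq_getElem?_getD, List.getElem?_eq_getElem hjL, he]
        rfl
      subst this
      rw [ha2get]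
      by_cases hcond : j ≠ rank ∧ (a1.getD j 0).testBit col = true
      · rw [if_pos hcond]
        exact pvSpan_xor (ha1span j) (by rw [ha1rank]; exact hspanF _ (pv_getD_mem hpL))
      · rw [if_neg hcond]
        exact ha1span j
    · -- backward span
      have hA1ofA2 : ∀ j, PvSpan a2 (a1.getD j 0) := by
        intro j
        have := ha2get j
        by_cases hcond : j ≠ rank ∧ (a1.getD j 0).testBit col = true
        · rw [if_pos hcond] at this
          have hjL : j < a2.length := by
            rw [ha2len, ← ha1len]
            exact pv_lt_len_of_testBit hcond.2
          have h1 : a1.getD j 0 = a2.getD j 0 ^^^ a2.getD rank 0 := by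
            rw [this, ha2rank, ← ha1rank, Nat.xor_assoc, Nat.xor_self, Nat.xor_zero]
          rw [h1]
          exact pvSpan_xor (pvSpan_mem (pv_getD_mem hjL))
            (pvSpan_mem (pv_getD_mem (by rw [ha2len]; omega)))
        · rw [if_neg hcond] at this
          by_cases hjL : j < a2.length
          · rw [← this]; exact pvSpan_mem (pv_getD_mem hjL)
          · rw [pv_getD_eq_zero (by rw [ha1len, ← ha2len]; omega)]
            exact PvSpan.zero
      have hAofA2 : ∀ x ∈ A, PvSpan a2 x := by
        intro x hx
        rcases List.mem_iff_getElem.mp hx with ⟨j, hjL, he⟩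
        have hxg : x = A.getD j 0 := by
          rw [List.getD_eq_getElem?_getD, List.getElem?_eq_getElem hjL, he]
          rfl
        subst hxg
        by_cases h1 : j = rank
        · have he1 : A.getD j 0 = a1.getD p 0 := by rw [ha1get, if_pos rfl, h1]
          rw [he1]; exact hA1ofA2 p
        · by_cases h2 : j = p
          · have he2 : A.getD j 0 = a1.getD rank 0 := by rw [ha1rank, h2]
            rw [he2]; exact hA1ofA2 rank
          · have he3 : A.getD j 0 = a1.getD j 0 := by
              rw [ha1get, if_neg (by omega), if_neg (by omega)]
            rw [he3]; exact hA1ofA2 j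
      intro r hr
      exact pvSpan_trans hAofA2 (hspanB r hr)
    · -- tail clear at col + 1
      intro r hr
      rw [pv_full_iff]
      constructor
      · rw [ha2get]
        by_cases hcond : r ≠ rank ∧ (a1.getD r 0).testBit col = true
        · rw [if_pos hcond]
          exact pv_xor_clear (ha1clear r (by omega)) (by rw [ha1rank]; exact hclear p (by omega))
        · rw [if_neg hcond]
          exact ha1clear r (by omega)
      · exact ha2col r (by omega)
    · -- pivot structure
      intro i hi
      by_cases hir : i < rank
      · obtain ⟨h1, h2, h3⟩ := hcs i hir
        have hgi : (cs ++ [col]).getD i 0 = cs.getD i 0 := by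
          rw [List.getD_eq_getElem?_getD, List.getD_eq_getElem?_getD,
            List.getElem?_append_left (by omega)]
        rw [hgi]
        have hc_i := cs.getD i 0
        -- entries of a1 at index ≠ i keep bit cs[i] clear; index i keeps it set
        have ha1bit : ∀ j, j ≠ i → (a1.getD j 0).testBit (cs.getD i 0) = false := by
          intro j hj
          rw [ha1get]
          by_cases hb1 : p = j
          · rw [if_pos hb1]; exact h3 rank (by omega)
          · rw [if_neg hb1]
            by_cases hb2 : rank = j
            · rw [if_pos hb2]; exact h3 p (by omega)
            · rw [if_neg hb2]; exact h3 j hj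
        have ha1biti : (a1.getD i 0).testBit (cs.getD i 0) = true := by
          rw [ha1get, if_neg (by omega), if_neg (by omega)]
          exact h2
        refine ⟨by omega, ?_, ?_⟩
        · rw [ha2get]
          by_cases hcond : i ≠ rank ∧ (a1.getD i 0).testBit col = true
          · rw [if_pos hcond, Nat.testBit_xor, ha1biti, ha1rank, h3 p (by omega)]
            rfl
          · rw [if_neg hcond]; exact ha1biti
        · intro j hj
          rw [ha2get]
          by_cases hcond : j ≠ rank ∧ (a1.getD j 0).testBit col = true
          · rw [if_pos hcond, Nat.testBit_xor, ha1bit j hj, ha1rank, h3 p (by omega)]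
            rfl
          · rw [if_neg hcond]; exact ha1bit j hj
      · have hieq : i = rank := by omega
        have hgi : (cs ++ [col]).getD i 0 = col := by
          rw [hieq, List.getD_eq_getElem?_getD, ← hcslen,
            List.getElem?_append_right (by omega)]
          simp
        rw [hgi]
        refine ⟨by omega, ?_, ?_⟩
        · rw [hieq, ha2rank]; exact hpbit
        · intro j hj
          exact ha2col j (by omega)

theorem pvColsA_inv {rows : List Nat} {N m : Nat} (hm : rows.length ≤ m) :
    ∀ col st, col ≤ N → PvInvA rows N col st.1 st.2 →
      PvInvA rows N N (pvColsA m N col st).1 (pvColsA m N col st).2 := by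
  intro col st
  intro hcol h
  induction hfuel : N - col generalizing col st with
  | zero =>
    have : ¬ col < N := by omega
    rw [pvColsA, if_neg this]
    have : col = N := by omega
    subst this; exact h
  | succ k ih =>
    have hlt : col < N := by omega
    rw [pvColsA, if_pos hlt]
    exact ih (col + 1) _ (by omega) (pvStepA_inv hm h) (by omega)

-- ================= B-side helper lemmas =================

theorem pv_xor4 (a b c d : Nat) : (a ^^^ b) ^^^ (c ^^^ d) = (a ^^^ c) ^^^ (b ^^^ d) := by
  apply Nat.eq_of_testBit_eq
  intro i
  simp only [Nat.testBit_xor]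
  cases a.testBit i <;> cases b.testBit i <;> cases c.testBit i <;> cases d.testBit i <;> rfl

theorem pvReduce_cons (q br : Nat) (t : List (Nat × Nat)) (row : Nat) :
    pvReduceB ((q, br) :: t) row = pvReduceB t (if row.testBit q then row ^^^ br else row) := rfl

theorem pvReduce_span {rows : List Nat} {basis : List (Nat × Nat)}
    (hb : ∀ pb ∈ basis, PvSpan rows pb.2) :
    ∀ row, PvSpan rows row → PvSpan rows (pvReduceB basis row) := by
  induction basis with
  | nil => intro row hr; exact hr
  | cons hd t ih =>
    intro row hr
    obtain ⟨q, br⟩ := hd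
    rw [pvReduce_cons]
    apply ih (fun pb h => hb pb (by simp [h]))
    by_cases h : row.testBit q
    · rw [if_pos h]; exact pvSpan_xor hr (hb ⟨q, br⟩ (by simp))
    · rw [if_neg h]; exact hr

theorem pvReduce_decomp (basis : List (Nat × Nat)) :
    ∀ row, ∃ y, PvSpan (basis.map Prod.snd) y ∧ pvReduceB basis row = row ^^^ y := by
  induction basis with
  | nil => intro row; exact ⟨0, PvSpan.zero, by simp [pvReduceB]⟩
  | cons hd t ih =>
    intro row
    obtain ⟨q, br⟩ := hd
    rw [pvReduce_cons]
    by_cases h : row.testBit q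
    · rcases ih (row ^^^ br) with ⟨y, hy, he⟩
      refine ⟨br ^^^ y, ?_, ?_⟩
      · exact pvSpan_xor (pvSpan_mem (by simp))
          (pvSpan_mono (fun r hr => by simp only [List.map_cons, List.mem_cons]; exact Or.inr hr) hy)
      · rw [if_pos h, he, Nat.xor_assoc]
    · rcases ih row with ⟨y, hy, he⟩
      refine ⟨y, pvSpan_mono (fun r hr => by simp only [List.map_cons, List.mem_cons]; exact Or.inr hr) hy, ?_⟩
      rw [if_neg h, he]

theorem pvReduce_preserve {basis : List (Nat × Nat)} {k : Nat}
    (h : ∀ pb ∈ basis, pb.2.testBit k = false) :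
    ∀ row, (pvReduceB basis row).testBit k = row.testBit k := by
  induction basis with
  | nil => intro row; rfl
  | cons hd t ih =>
    intro row
    obtain ⟨q, br⟩ := hd
    rw [pvReduce_cons]
    rw [ih (fun pb hpb => h pb (by simp [hpb]))]
    by_cases hb : row.testBit q
    · rw [if_pos hb, Nat.testBit_xor, h ⟨q, br⟩ (by simp)]
      cases row.testBit k <;> rfl
    · rw [if_neg hb]

theorem pvPiv_self {N : Nat} {x p : Nat} (h1 : p < N) (h2 : x &&& (2 ^ N - 1) ≠ 0)
    (h3 : (x &&& (2 ^ N - 1)).log2 = p) : x.testBit p = true := by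
  have := pv_testBit_log2 _ h2
  rw [h3, pv_mask_testBit] at this
  simpa [h1] using this

theorem pvPiv_high {N : Nat} {x p k : Nat} (h3 : (x &&& (2 ^ N - 1)).log2 = p)
    (hk : p < k) (hkN : k < N) : x.testBit k = false := by
  have : (x &&& (2 ^ N - 1)).testBit k = false :=
    pv_testBit_false_of_log2_lt (Or.inr (by omega))
  rw [pv_mask_testBit] at this
  simpa [hkN] using this

def PvProps (N : Nat) (basis : List (Nat × Nat)) : Prop :=
  ∀ pb ∈ basis, pb.1 < N ∧ pb.2 &&& (2 ^ N - 1) ≠ 0 ∧ (pb.2 &&& (2 ^ N - 1)).log2 = pb.1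

theorem pvReduce_clear {N : Nat} {basis : List (Nat × Nat)} (hP : PvProps N basis)
    (hsort : List.Pairwise (fun a b : Nat × Nat => b.1 < a.1) basis) :
    ∀ row, ∀ pb ∈ basis, (pvReduceB basis row).testBit pb.1 = false := by
  induction basis with
  | nil => simp
  | cons hd t ih =>
    intro row pb hpb
    obtain ⟨q, br⟩ := hd
    have hhd := hP ⟨q, br⟩ (by simp)
    have hlt : ∀ pb' ∈ t, pb'.1 < q := fun pb' h => (List.pairwise_cons.mp hsort).1 pb' h
    rw [pvReduce_cons]
    rcases List.mem_cons.mp hpb with h | h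
    · subst h
      have hbrq : br.testBit q = true := pvPiv_self hhd.1 hhd.2.1 hhd.2.2
      have hr1q : (if row.testBit q then row ^^^ br else row).testBit q = false := by
        by_cases hb : row.testBit q
        · rw [if_pos hb, Nat.testBit_xor, hb, hbrq]; rfl
        · rw [if_neg hb]; simpa using hb
      rw [pvReduce_preserve ?_ _, hr1q]
      intro pb' hpb'
      exact pvPiv_high (hP pb' (by simp [hpb'])).2.2 (hlt pb' hpb') hhd.1
    · exact ih (fun pb' h' => hP pb' (by simp [h'])) (List.pairwise_cons.mp hsort).2 _ pb h

theorem pvInsert_mem (p row : Nat) (basis : List (Nat × Nat)) (pb : Nat × Nat) :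
    pb ∈ pvInsertB p row basis ↔ pb = (p, row) ∨ pb ∈ basis := by
  induction basis with
  | nil => simp [pvInsertB]
  | cons hd t ih =>
    obtain ⟨q, br⟩ := hd
    rw [pvInsertB]
    by_cases h : p < q
    · rw [if_pos h]
      simp only [List.mem_cons, ih]
      tauto
    · rw [if_neg h]
      simp only [List.mem_cons]

theorem pvInsert_pairwise {p row : Nat} {basis : List (Nat × Nat)}
    (hs : List.Pairwise (fun a b : Nat × Nat => b.1 < a.1) basis)
    (hne : ∀ pb ∈ basis, pb.1 ≠ p) :
    List.Pairwise (fun a b : Nat × Nat => b.1 < a.1) (pvInsertB p row basis) := by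
  induction basis with
  | nil => simp [pvInsertB]
  | cons hd t ih =>
    obtain ⟨q, br⟩ := hd
    have hq : ∀ pb ∈ t, pb.1 < q := fun pb h => (List.pairwise_cons.mp hs).1 pb h
    rw [pvInsertB]
    by_cases h : p < q
    · rw [if_pos h]
      refine List.pairwise_cons.mpr ⟨?_, ih (List.pairwise_cons.mp hs).2 (fun pb hpb => hne pb (by simp [hpb]))⟩
      intro pb hpb
      rcases (pvInsert_mem p row t pb).mp hpb with he | ht
      · subst he; exact h
      · exact hq pb ht
    · rw [if_neg h]
      have hqp : q < p := by
        have := hne ⟨q, br⟩ (by simp)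
        simp at this
        omega
      refine List.pairwise_cons.mpr ⟨?_, hs⟩
      intro pb hpb
      rcases List.mem_cons.mp hpb with he | ht
      · subst he; exact hqp
      · exact lt_trans (hq pb ht) hqp

theorem pvCons_basis {N : Nat} {basis : List (Nat × Nat)} (hP : PvProps N basis)
    (hsort : List.Pairwise (fun a b : Nat × Nat => b.1 < a.1) basis) :
    PvCons N (basis.map Prod.snd) := by
  induction basis with
  | nil => exact PvCons.nil
  | cons hd t ih =>
    obtain ⟨q, br⟩ := hd
    have hhd := hP ⟨q, br⟩ (by simp)
    refine PvCons.piv br _ q hhd.1 (pvPiv_self hhd.1 hhd.2.1 hhd.2.2) ?_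
      (ih (fun pb h => hP pb (by simp [h])) (List.pairwise_cons.mp hsort).2)
    intro y hy
    rcases List.mem_map.mp hy with ⟨pb, hpb, he⟩
    subst he
    exact pvPiv_high (hP pb (by simp [hpb])).2.2 ((List.pairwise_cons.mp hsort).1 pb hpb) hhd.1

-- ================= B-side invariant =================


def PvInvB (N : Nat) (rows : List Nat) (basis : List (Nat × Nat)) : Prop :=
  (∀ pb ∈ basis, pb.1 < N ∧ pb.2 &&& (2 ^ N - 1) ≠ 0 ∧
    (pb.2 &&& (2 ^ N - 1)).log2 = pb.1 ∧ PvSpan rows pb.2) ∧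
  List.Pairwise (fun a b : Nat × Nat => b.1 < a.1) basis ∧
  (∀ x, PvSpan rows x → ∃ y, PvSpan (basis.map Prod.snd) y ∧ (x ^^^ y) &&& (2 ^ (N + 1) - 1) = 0)

def pvCondition (rows : List Nat) (N : Nat) : Prop :=
  ∃ x, PvSpan rows x ∧ x &&& (2 ^ N - 1) = 0 ∧ x.testBit N = true

theorem pvInvB_not_cond {N : Nat} {rows : List Nat} {basis : List (Nat × Nat)}
    (h : PvInvB N rows basis) : ¬ pvCondition rows N := by
  rintro ⟨x, hx, hm, hbit⟩
  rcases h.2.2 x hx with ⟨y, hy, hfull⟩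
  have h1 := (pv_full_iff _ N).mp hfull
  have hym : y &&& (2 ^ N - 1) = 0 := by
    have h2 := h1.1
    rw [Nat.and_xor_distrib_right, hm, Nat.zero_xor] at h2
    exact h2
  have hP : PvProps N basis := fun pb hpb => ⟨(h.1 pb hpb).1, (h.1 pb hpb).2.1, (h.1 pb hpb).2.2.1⟩
  have hyN : y.testBit N = false := pvCons_consis (pvCons_basis hP h.2.1) hy hym
  have h2 := h1.2
  rw [Nat.testBit_xor, hbit, hyN] at h2
  simp at h2

theorem pvCover_extend {F : Nat} {rows : List Nat} {bs : List Nat} {rowB : Nat}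
    (b3 : ∀ x, PvSpan rows x → ∃ y, PvSpan bs y ∧ (x ^^^ y) &&& F = 0)
    (hnew : ∃ y, PvSpan bs y ∧ (rowB ^^^ y) &&& F = 0) :
    ∀ x, PvSpan (rows ++ [rowB]) x → ∃ y, PvSpan bs y ∧ (x ^^^ y) &&& F = 0 := by
  intro x hx
  induction hx with
  | zero => exact ⟨0, PvSpan.zero, by simp⟩
  | step r z hr _ ih =>
    have hrr : ∃ y, PvSpan bs y ∧ (r ^^^ y) &&& F = 0 := by
      rcases List.mem_append.mp hr with h | h
      · exact b3 r (pvSpan_mem h)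
      · have : r = rowB := by simpa using h
        subst this; exact hnew
    rcases hrr with ⟨y1, hy1, he1⟩
    rcases ih with ⟨y2, hy2, he2⟩
    refine ⟨y1 ^^^ y2, pvSpan_xor hy1 hy2, ?_⟩
    rw [pv_xor4, Nat.and_xor_distrib_right, he1, he2]
    rfl

theorem pvCover_mono {bs bs' : List Nat} (h : ∀ r ∈ bs, r ∈ bs') {F : Nat} {rows : List Nat}
    (b3 : ∀ x, PvSpan rows x → ∃ y, PvSpan bs y ∧ (x ^^^ y) &&& F = 0) :
    ∀ x, PvSpan rows x → ∃ y, PvSpan bs' y ∧ (x ^^^ y) &&& F = 0 := by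
  intro x hx
  rcases b3 x hx with ⟨y, hy, he⟩
  exact ⟨y, pvSpan_mono h hy, he⟩

theorem pv_snd_mem_insert (p row : Nat) (basis : List (Nat × Nat)) :
    ∀ r ∈ basis.map Prod.snd, r ∈ (pvInsertB p row basis).map Prod.snd := by
  intro r hr
  rcases List.mem_map.mp hr with ⟨pb, hpb, he⟩
  exact List.mem_map.mpr ⟨pb, (pvInsert_mem p row basis pb).mpr (Or.inr hpb), he⟩

theorem pvLoopB_iff {N : Nat} :
    ∀ (rest : List (List Int × Int)) (basis : List (Nat × Nat)) (rows : List Nat),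
      PvInvB N rows basis →
      (pvLoopB N (2 ^ N - 1) basis rest = true ↔
        pvCondition (rows ++ rest.map (fun p => pvRowB p.1 p.2 N)) N) := by
  intro rest
  induction rest with
  | nil =>
    intro basis rows h
    simp only [pvLoopB, List.map_nil, List.append_nil]
    constructor
    · intro hf; cases hf
    · intro hc; exact absurd hc (pvInvB_not_cond h)
  | cons cb t ih =>
    intro basis rows h
    obtain ⟨c, bi⟩ := cb
    set rowB := pvRowB c bi N with hrowB
    set row := pvReduceB basis rowB with hrow
    set coeff := row &&& (2 ^ N - 1) with hcoeff
    have hbspan : ∀ pb ∈ basis, PvSpan rows pb.2 := fun pb hpb => (h.1 pb hpb).2.2.2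
    have hrspan : PvSpan (rows ++ [rowB]) row := by
      apply pvReduce_span (rows := rows ++ [rowB])
      · intro pb hpb
        exact pvSpan_mono (fun r hr => List.mem_append.mpr (Or.inl hr)) (hbspan pb hpb)
      · exact pvSpan_mem (List.mem_append.mpr (Or.inr (by simp)))
    have hlist : rows ++ (((c, bi) :: t).map (fun p => pvRowB p.1 p.2 N)) =
        (rows ++ [rowB]) ++ t.map (fun p => pvRowB p.1 p.2 N) := by
      simp [hrowB]
    have hunfold : pvLoopB N (2 ^ N - 1) basis ((c, bi) :: t) =
        (if coeff = 0 then
          if row.testBit N then true else pvLoopB N (2 ^ N - 1) basis t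
        else pvLoopB N (2 ^ N - 1) (pvInsertB coeff.log2 row basis) t) := rfl
    rw [hunfold, hlist]
    rcases pvReduce_decomp basis rowB with ⟨yr, hyr, heyr⟩
    by_cases hc0 : coeff = 0
    · rw [if_pos hc0]
      by_cases hbn : row.testBit N = true
      · rw [if_pos hbn]
        constructor
        · intro _
          refine ⟨row, pvSpan_mono (fun r hr => List.mem_append.mpr (Or.inl hr)) hrspan, ?_, hbn⟩
          rw [← hcoeff]; exact hc0
        · intro _; rfl
      · rw [if_neg hbn]
        apply ih basis (rows ++ [rowB])
        refine ⟨?_, h.2.1, ?_⟩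
        · intro pb hpb
          have hp := h.1 pb hpb
          exact ⟨hp.1, hp.2.1, hp.2.2.1,
            pvSpan_mono (fun r hr => List.mem_append.mpr (Or.inl hr)) hp.2.2.2⟩
        · apply pvCover_extend h.2.2
          refine ⟨yr, hyr, ?_⟩
          have hre : rowB ^^^ yr = row := by rw [← heyr, hrow]
          rw [hre, pv_full_iff]
          exact ⟨by rw [← hcoeff]; exact hc0, by simpa using hbn⟩
    · rw [if_neg hc0]
      have hcN : coeff < 2 ^ N := by
        have h1 : coeff ≤ 2 ^ N - 1 := by rw [hcoeff]; exact Nat.and_le_right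
        have h2 : 0 < 2 ^ N := Nat.pow_pos (by omega)
        omega
      have hpN : coeff.log2 < N := (Nat.log2_lt hc0).mpr hcN
      have hrowbit : row.testBit coeff.log2 = true :=
        pvPiv_self hpN (by rw [← hcoeff]; exact hc0) (by rw [← hcoeff])
      have hfresh : ∀ pb ∈ basis, pb.1 ≠ coeff.log2 := by
        intro pb hpb he
        have hP : PvProps N basis := fun pb' hpb' =>
          ⟨(h.1 pb' hpb').1, (h.1 pb' hpb').2.1, (h.1 pb' hpb').2.2.1⟩
        have hclr := pvReduce_clear hP h.2.1 rowB pb hpb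
        rw [← hrow, he, hrowbit] at hclr
        cases hclr
      apply ih (pvInsertB coeff.log2 row basis) (rows ++ [rowB])
      refine ⟨?_, pvInsert_pairwise h.2.1 hfresh, ?_⟩
      · intro pb hpb
        rcases (pvInsert_mem _ _ _ pb).mp hpb with he | hm
        · subst he
          exact ⟨hpN, by rw [← hcoeff]; exact hc0, by rw [← hcoeff], hrspan⟩
        · have hp := h.1 pb hm
          exact ⟨hp.1, hp.2.1, hp.2.2.1,
            pvSpan_mono (fun r hr => List.mem_append.mpr (Or.inl hr)) hp.2.2.2⟩
      · apply pvCover_extend (pvCover_mono (pv_snd_mem_insert coeff.log2 row basis) h.2.2)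
        refine ⟨row ^^^ yr, ?_, ?_⟩
        · refine pvSpan_xor (pvSpan_mem ?_) (pvSpan_mono (pv_snd_mem_insert coeff.log2 row basis) hyr)
          exact List.mem_map.mpr ⟨(coeff.log2, row), (pvInsert_mem _ _ _ _).mpr (Or.inl rfl), rfl⟩
        · have hre : row = rowB ^^^ yr := by rw [hrow, heyr]
          have hz : rowB ^^^ (row ^^^ yr) = 0 := by
            rw [hre]
            apply Nat.eq_of_testBit_eq
            intro i
            simp only [Nat.testBit_xor, Nat.zero_testBit]
            cases rowB.testBit i <;> cases yr.testBit i <;> rfl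
          rw [hz, Nat.zero_and]

theorem pv_foldl_or_init (l : List Int) :
    ∀ a : Nat, l.foldl (fun row v => row ||| (1 <<< v.toNat)) a =
      a ||| l.foldl (fun row v => row ||| (1 <<< v.toNat)) 0 := by
  induction l with
  | nil => intro a; simp
  | cons v t ih =>
    intro a
    simp only [List.foldl_cons]
    rw [ih (a ||| (1 <<< v.toNat)), ih ((0 : Nat) ||| (1 <<< v.toNat)), Nat.zero_or,
      Nat.or_assoc]

theorem pvRow_eq (c : List Int) (bi : Int) (n : Int) : pvRowB c bi n.toNat = pvRowA c bi n := by
  unfold pvRowA pvRowB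
  by_cases h : bi ≠ 0
  · rw [if_pos h, if_pos h, pv_foldl_or_init, Nat.or_comm]
  · rw [if_neg h, if_neg h]

theorem pv_rows_eq (clauses_vars : List (List Int)) (b_vec : List Int) (n : Int) :
    (clauses_vars.zip b_vec).map (fun p => pvRowB p.1 p.2 n.toNat) = pvAugA clauses_vars b_vec n := by
  unfold pvAugA
  exact List.map_congr_left (fun p _ => pvRow_eq p.1 p.2 n)

theorem pvA_iff (clauses_vars : List (List Int)) (b_vec : List Int) (n : Int) :
    gf2_is_unsat_py clauses_vars b_vec n = true ↔
      pvCondition (pvAugA clauses_vars b_vec n) n.toNat := by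
  set rows := pvAugA clauses_vars b_vec n with hrows
  set N := n.toNat with hN
  set m := clauses_vars.length with hmdef
  have hLm : rows.length ≤ m := by
    rw [hrows]
    unfold pvAugA
    rw [List.length_map, List.length_zip]
    exact Nat.min_le_left _ _
  have hinit : PvInvA rows N 0 rows 0 := by
    refine ⟨rfl, Nat.zero_le _, fun r hr => pvSpan_mem hr, fun r hr => pvSpan_mem hr, ?_,
      [], rfl, ?_⟩
    · intro r _
      simp
    · intro i hi
      exact absurd hi (by omega)
  have hinv := pvColsA_inv hLm 0 (rows, 0) (Nat.zero_le N) hinit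
  set fin := pvColsA m N 0 (rows, 0) with hfin
  have hshow : gf2_is_unsat_py clauses_vars b_vec n =
      (List.range' fin.2 (m - fin.2)).any (fun r => fin.1.getD r 0 &&& (1 <<< N) != 0) := rfl
  rw [hshow]
  obtain ⟨hflen, hfrank, hfspanF, hfspanB, hfclear, cs, hcslen, hcs⟩ := hinv
  constructor
  · intro hany
    rw [List.any_eq_true] at hany
    obtain ⟨r, hrmem, hrpred⟩ := hany
    simp only [bne_iff_ne, ne_eq] at hrpred
    have hrbit : (fin.1.getD r 0).testBit N = true := (pv_and_pow_ne' _ _).mp hrpred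
    have hrL : r < fin.1.length := pv_lt_len_of_testBit hrbit
    have hrge : fin.2 ≤ r := (List.mem_range'_1.mp hrmem).1
    exact ⟨fin.1.getD r 0, hfspanF _ (pv_getD_mem hrL), hfclear r hrge, hrbit⟩
  · intro hcond
    by_contra hany
    have hanyf : ∀ r ∈ List.range' fin.2 (m - fin.2),
        ((fin.1.getD r 0 &&& (1 <<< N)) != 0) = false := by
      intro r hr
      cases hres : ((fin.1.getD r 0 &&& (1 <<< N)) != 0)
      · rfl
      · exact absurd (List.any_eq_true.mpr ⟨r, hr, hres⟩) hany
    obtain ⟨x, hx, hm0, hbN⟩ := hcond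
    have hxspan2 : PvSpan fin.1 x := pvSpan_trans hfspanB hx
    have hconsA : PvCons N fin.1 := by
      apply pvCons_of_idx fin.1
      intro i hiL
      by_cases hi : i < fin.2
      · obtain ⟨h1, h2, h3⟩ := hcs i hi
        exact Or.inr ⟨cs.getD i 0, h1, h2, fun j hj => h3 j hj⟩
      · left
        rw [pv_full_iff]
        refine ⟨hfclear i (by omega), ?_⟩
        have him : i ∈ List.range' fin.2 (m - fin.2) := by
          rw [List.mem_range'_1]
          have : fin.1.length = rows.length := hflen
          omega
        have h0 := hanyf i him
        simp only [bne_eq_false_iff_eq] at h0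
        cases htb : (fin.1.getD i 0).testBit N
        · rfl
        · exact absurd h0 ((pv_and_pow_ne' _ _).mpr htb)
    have hfalse := pvCons_consis hconsA hxspan2 hm0
    rw [hbN] at hfalse
    cases hfalse

theorem pvB_iff (clauses_vars : List (List Int)) (b_vec : List Int) (n : Int) :
    gf2_is_unsat_py_alt clauses_vars b_vec n = true ↔
      pvCondition (pvAugA clauses_vars b_vec n) n.toNat := by
  unfold gf2_is_unsat_py_alt
  by_cases hg : (clauses_vars.isEmpty || b_vec.isEmpty) = true
  · rw [if_pos hg]
    have hzip : clauses_vars.zip b_vec = [] := by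
      rcases Bool.or_eq_true_iff.mp hg with h | h
      · rw [List.isEmpty_iff.mp h]; simp
      · rw [List.isEmpty_iff.mp h]; simp
    rw [show pvAugA clauses_vars b_vec n = [] by unfold pvAugA; rw [hzip]; rfl]
    constructor
    · intro hf; cases hf
    · rintro ⟨x, hx, _, hbit⟩
      rw [pvSpan_nil hx, Nat.zero_testBit] at hbit
      cases hbit
  · rw [if_neg hg]
    have hmask : (1 <<< n.toNat) - 1 = 2 ^ n.toNat - 1 := by
      rw [Nat.shiftLeft_eq, one_mul]
    rw [hmask]
    have h := pvLoopB_iff (N := n.toNat) (clauses_vars.zip b_vec) [] []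
      ⟨by simp, List.Pairwise.nil, by
        intro x hx
        rw [pvSpan_nil hx]
        exact ⟨0, PvSpan.zero, by simp⟩⟩
    rw [h, List.nil_append, pv_rows_eq]

-- ===== VERDICT (by name: the statement is the Claim_ definition above) =====
theorem gf2_is_unsat_py_spec : Claim_equal_gf2_is_unsat_py := by
  intro cv b n _ _
  unfold Spec_gf2_is_unsat_py
  rw [Bool.eq_iff_iff, pvA_iff, pvB_iff]
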